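-- pv_equiv track=rewrite | github.com/vanbanTruong/Fairness-in-Large-Language-Models | definitions/encoder_only/extrinsic_bias/equal_opportunity/data.py | extract_instances_by_group
-- ===== SOURCE A (Python) =====
-- def extract_instances_by_group(data, label_key='label', group_key='gender'):
--     grouped = {}
--     for entry in data:
--         label = entry[label_key]
--         group = entry[group_key]
--         pred = entry["prediction"]
--         if (group, label) not in grouped:
--             grouped[(group, label)] = {"TP": 0, "Total": 0}
--         if label == pred:
--             grouped[(group, label)]["TP"] += 1
--         grouped[(group, label)]["Total"] += 1
--     return grouped
-- ===== SOURCE B (Python) =====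
-- def extract_instances_by_group(data, label_key='label', group_key='gender'):
--     # Stage 1: one extraction pass over the raw entries.
--     triples = [(e[group_key], e[label_key], e["prediction"]) for e in data]
--     # Stage 2: two flat aggregation tables keyed by (group, label).
--     totals = {}
--     for g, l, _ in triples:
--         totals[(g, l)] = totals.get((g, l), 0) + 1
--     tp = {}
--     for g, l, p in triples:
--         if l == p:
--             tp[(g, l)] = tp.get((g, l), 0) + 1
--     # Stage 3: assemble the nested result from the two tables.
--     return {k: {"TP": tp.get(k, 0), "Total": totals[k]} for k in totals}
-- ===== Notes on version B (the rewrite author's own statement) =====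
-- stated objective: alternative
-- what changed: B works in three staged passes over different data structures: it first extracts a flat list of (group,label,prediction) triples, then builds two separate flat integer counting tables totals[(group,label)] and tp[(group,label)], and finally assembles the nested result dict from the two tables, instead of A's single pass mutating one nested dict of counters in place.
import Mathlib
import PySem

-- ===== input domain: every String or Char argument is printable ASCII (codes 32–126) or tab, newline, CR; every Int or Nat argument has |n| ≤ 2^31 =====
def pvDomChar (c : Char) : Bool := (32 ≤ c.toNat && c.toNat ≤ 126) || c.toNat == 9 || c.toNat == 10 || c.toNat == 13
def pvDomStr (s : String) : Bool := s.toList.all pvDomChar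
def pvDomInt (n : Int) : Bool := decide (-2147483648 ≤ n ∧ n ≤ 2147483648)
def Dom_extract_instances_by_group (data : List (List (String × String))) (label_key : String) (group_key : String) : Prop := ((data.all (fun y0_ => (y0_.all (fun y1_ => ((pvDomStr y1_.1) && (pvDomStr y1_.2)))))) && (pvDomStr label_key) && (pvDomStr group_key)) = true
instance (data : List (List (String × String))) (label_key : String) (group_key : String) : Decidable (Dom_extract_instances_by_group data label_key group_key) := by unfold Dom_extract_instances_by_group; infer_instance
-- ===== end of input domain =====

-- B replaces A's single pass mutating one nested dict of counters by three staged passes: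
-- extract flat triples, build two flat counting tables (totals and true positives), then assemble
-- the nested result from the tables (alternative decomposition/data structure, same results).
-- ===== PORT A =====
def extract_instances_by_group (data : List (List (String × String))) (label_key : String) (group_key : String) : List (String × String × List (String × Int)) :=
  let grouped := data.foldl (fun grouped entry =>
    let label := (PySem.Dict.mk entry).getD label_key ""      -- entry[label_key]; default unreachable under Pre_ (Python raises KeyError)
    let group := (PySem.Dict.mk entry).getD group_key ""
    let pred  := (PySem.Dict.mk entry).getD "prediction" ""
    let grouped := if grouped.contains (group, label) then grouped
      else grouped.insert (group, label) (PySem.Dict.mk [("TP", (0 : Int)), ("Total", (0 : Int))])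
    let grouped := if label == pred then
        grouped.modify (group, label) PySem.Dict.empty (fun inner => inner.modify "TP" 0 (· + 1))
      else grouped
    grouped.modify (group, label) PySem.Dict.empty (fun inner => inner.modify "Total" 0 (· + 1))
  ) PySem.Dict.empty
  grouped.items.map (fun p => (p.1.1, p.1.2, p.2.items))

-- ===== PORT B =====
def extract_instances_by_group_alt (data : List (List (String × String))) (label_key : String) (group_key : String) : List (String × String × List (String × Int)) :=
  -- stage 1: the triples list comprehension; getD's default is unreachable under Pre_ (Python raises KeyError)
  let triples := data.map (fun e =>
    ((PySem.Dict.mk e).getD group_key "", (PySem.Dict.mk e).getD label_key "", (PySem.Dict.mk e).getD "prediction" ""))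
  -- stage 2: the two flat counting tables
  let totals := triples.foldl (fun (d : PySem.Dict (String × String) Int) t =>
    d.insert (t.1, t.2.1) (d.getD (t.1, t.2.1) 0 + 1)) PySem.Dict.empty
  let tp := triples.foldl (fun (d : PySem.Dict (String × String) Int) t =>
    if t.2.1 == t.2.2 then d.insert (t.1, t.2.1) (d.getD (t.1, t.2.1) 0 + 1) else d) PySem.Dict.empty
  -- stage 3: assemble the result dict from the tables
  totals.keys.map (fun k => (k.1, k.2, [("TP", tp.getD k 0), ("Total", totals.getD k 0)]))

-- ===== PRECONDITION & SPEC =====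
-- Pre_: Python A raises KeyError unless every entry has label_key, group_key and "prediction".
def Pre_extract_instances_by_group (data : List (List (String × String))) (label_key : String) (group_key : String) : Prop :=
  (data.all (fun entry => (PySem.Dict.mk entry).contains label_key && (PySem.Dict.mk entry).contains group_key && (PySem.Dict.mk entry).contains "prediction")) = true
instance (data : List (List (String × String))) (label_key : String) (group_key : String) : Decidable (Pre_extract_instances_by_group data label_key group_key) := by unfold Pre_extract_instances_by_group; infer_instance
def pvWitness_extract_instances_by_group : (List (List (String × String))) × String × String :=
  ([[("label", "1"), ("gender", "m"), ("prediction", "1")], [("label", "0"), ("gender", "m"), ("prediction", "1")]], "label", "gender")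
def Spec_extract_instances_by_group (data : List (List (String × String))) (label_key : String) (group_key : String) (out : List (String × String × List (String × Int))) : Prop := out = extract_instances_by_group_alt data label_key group_key
instance (data : List (List (String × String))) (label_key : String) (group_key : String) (out : List (String × String × List (String × Int))) : Decidable (Spec_extract_instances_by_group data label_key group_key out) := by unfold Spec_extract_instances_by_group; infer_instance

-- ===== CLAIM (what is proved, stated in full; the proofs are below) =====
def Claim_equal_extract_instances_by_group : Prop := ∀ (data : List (List (String × String))) (label_key : String) (group_key : String), Dom_extract_instances_by_group data label_key group_key → Pre_extract_instances_by_group data label_key group_key → Spec_extract_instances_by_group data label_key group_key (extract_instances_by_group data label_key group_key)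


-- ===== LEMMAS AND PROOFS =====

-- the (group, label) key and the label == prediction flag of one entry, as A and B both compute them
def pvKey (label_key group_key : String) (e : List (String × String)) : String × String :=
  ((PySem.Dict.mk e).getD group_key "", (PySem.Dict.mk e).getD label_key "")

def pvFlag (label_key : String) (e : List (String × String)) : Bool :=
  (PySem.Dict.mk e).getD label_key "" == (PySem.Dict.mk e).getD "prediction" ""

def pvVal (t a : Int) : PySem.Dict String Int := PySem.Dict.mk [("TP", t), ("Total", a)]

-- A's loop body, named so the characterisation lemma can speak about it
def pvStepA (label_key group_key : String) (grouped : PySem.Dict (String × String) (PySem.Dict String Int))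
    (entry : List (String × String)) : PySem.Dict (String × String) (PySem.Dict String Int) :=
  let label := (PySem.Dict.mk entry).getD label_key ""
  let group := (PySem.Dict.mk entry).getD group_key ""
  let pred  := (PySem.Dict.mk entry).getD "prediction" ""
  let grouped := if grouped.contains (group, label) then grouped
    else grouped.insert (group, label) (PySem.Dict.mk [("TP", (0 : Int)), ("Total", (0 : Int))])
  let grouped := if label == pred then
      grouped.modify (group, label) PySem.Dict.empty (fun inner => inner.modify "TP" 0 (· + 1))
    else grouped
  grouped.modify (group, label) PySem.Dict.empty (fun inner => inner.modify "Total" 0 (· + 1))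

lemma pvA_eq (data : List (List (String × String))) (lk gk : String) :
    extract_instances_by_group data lk gk
      = (data.foldl (pvStepA lk gk) PySem.Dict.empty).items.map (fun p => (p.1.1, p.1.2, p.2.items)) := rfl

lemma pvStepA_eq (lk gk : String) (g : PySem.Dict (String × String) (PySem.Dict String Int)) (e : List (String × String)) :
    pvStepA lk gk g e =
      (if pvFlag lk e then
        (if g.contains (pvKey lk gk e) then g else g.insert (pvKey lk gk e) (pvVal 0 0)).modify (pvKey lk gk e) PySem.Dict.empty (fun inner => inner.modify "TP" 0 (· + 1))
      else (if g.contains (pvKey lk gk e) then g else g.insert (pvKey lk gk e) (pvVal 0 0))).modify (pvKey lk gk e) PySem.Dict.empty (fun inner => inner.modify "Total" 0 (· + 1)) := rfl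

-- a fold that updates only when p holds is the fold over the filtered list
lemma pvFoldl_if_filter {α β : Type} (p : β → Bool) (g : α → β → α) (l : List β) (d : α) :
    l.foldl (fun d t => if p t then g d t else d) d = (l.filter p).foldl g d := by
  induction l generalizing d with
  | nil => rfl
  | cons x xs ih => by_cases h : p x <;> simp [h, ih]

-- B's counting folds are Counter of the corresponding key lists
lemma pvB_counter (lk gk : String) (data : List (List (String × String))) :
    (data.map (fun e =>
        ((PySem.Dict.mk e).getD gk "", (PySem.Dict.mk e).getD lk "", (PySem.Dict.mk e).getD "prediction" ""))).foldl
      (fun (d : PySem.Dict (String × String) Int) t => d.insert (t.1, t.2.1) (d.getD (t.1, t.2.1) 0 + 1)) PySem.Dict.empty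
    = PySem.Dict.counter (data.map (pvKey lk gk)) := by
  rw [← PySem.Dict.foldl_insert_getD_add_one_eq_counter]
  have h : List.map (pvKey lk gk) data
      = List.map (fun t : String × String × String => (t.1, t.2.1))
          (data.map (fun e =>
            ((PySem.Dict.mk e).getD gk "", (PySem.Dict.mk e).getD lk "", (PySem.Dict.mk e).getD "prediction" ""))) := by
    rw [List.map_map]; rfl
  rw [h, List.map_map, List.foldl_map, List.foldl_map]
  simp only [Function.comp_def]

lemma pvB_eq (data : List (List (String × String))) (lk gk : String) :
    extract_instances_by_group_alt data lk gk
      = (PySem.Set.ofList (data.map (pvKey lk gk))).map (fun k =>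
          (k.1, k.2, [("TP", (((data.filter (pvFlag lk)).map (pvKey lk gk)).count k : Int)),
                      ("Total", (((data.map (pvKey lk gk)).count k : Int)))])) := by
  show (let triples := data.map (fun e =>
          ((PySem.Dict.mk e).getD gk "", (PySem.Dict.mk e).getD lk "", (PySem.Dict.mk e).getD "prediction" ""));
        let totals := triples.foldl (fun (d : PySem.Dict (String × String) Int) t =>
          d.insert (t.1, t.2.1) (d.getD (t.1, t.2.1) 0 + 1)) PySem.Dict.empty;
        let tp := triples.foldl (fun (d : PySem.Dict (String × String) Int) t =>
          if t.2.1 == t.2.2 then d.insert (t.1, t.2.1) (d.getD (t.1, t.2.1) 0 + 1) else d) PySem.Dict.empty;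
        totals.keys.map (fun k => (k.1, k.2, [("TP", tp.getD k 0), ("Total", totals.getD k 0)]))) = _
  simp only
  rw [pvFoldl_if_filter, List.filter_map]
  have hfil : (data.filter ((fun (t : String × String × String) => t.2.1 == t.2.2) ∘
      (fun e => ((PySem.Dict.mk e).getD gk "", (PySem.Dict.mk e).getD lk "", (PySem.Dict.mk e).getD "prediction" ""))))
      = data.filter (pvFlag lk) := by
    apply List.filter_congr; intro e _; rfl
  rw [hfil, pvB_counter, pvB_counter]
  simp only [PySem.Dict.keys_counter, PySem.Dict.getD_counter]

lemma pvModify_TP (t a : Int) :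
    (pvVal t a).modify "TP" 0 (· + 1) = pvVal (t + 1) a := by
  apply PySem.Dict.ext
  rw [pvVal, pvVal, PySem.Dict.modify, PySem.Dict.items_insert_of_contains _ _ (by simp [PySem.Dict.contains_mk])]
  simp [PySem.Dict.getD_eq_get?_getD, PySem.Dict.get?_mk_cons]

lemma pvModify_Total (t a : Int) :
    (pvVal t a).modify "Total" 0 (· + 1) = pvVal t (a + 1) := by
  apply PySem.Dict.ext
  rw [pvVal, pvVal, PySem.Dict.modify, PySem.Dict.items_insert_of_contains _ _ (by simp [PySem.Dict.contains_mk])]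
  simp [PySem.Dict.getD_eq_get?_getD, PySem.Dict.get?_mk_cons]

lemma pvFoldA_items (lk gk : String) (data : List (List (String × String))) :
    (data.foldl (pvStepA lk gk) PySem.Dict.empty).items
      = (PySem.Set.ofList (data.map (pvKey lk gk))).map (fun k =>
          (k, pvVal (((data.filter (pvFlag lk)).map (pvKey lk gk)).count k : Int)
                    (((data.map (pvKey lk gk)).count k : Int)))) := by
  induction data using List.reverseRecOn with
  | nil => rfl
  | append_singleton l e ih =>
    rw [List.foldl_append, List.foldl_cons, List.foldl_nil, pvStepA_eq]
    set key := pvKey lk gk with hkeydef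
    set flag := pvFlag lk with hflagdef
    set k0 := key e with hk0
    set D := l.foldl (pvStepA lk gk) PySem.Dict.empty with hD
    have hkeys : D.keys = PySem.Set.ofList (l.map key) := by
      simp [PySem.Dict.keys, ih, List.map_map, Function.comp_def]
    have hknd : D.keys.Nodup := by rw [hkeys]; exact PySem.Set.nodup_ofList _
    have hcont : D.contains k0 = decide (k0 ∈ List.map key l) := by
      rw [PySem.Dict.contains_eq_decide_mem_keys, hkeys]
      simp [PySem.Set.mem_ofList]
    have hcounts : ∀ k : String × String, ((l ++ [e]).map key).count k
        = (l.map key).count k + (if k = k0 then 1 else 0) := by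
      intro k
      rw [List.map_append, List.map_cons, List.map_nil, List.count_append, List.count_singleton,
        ← hk0]
      by_cases hkk : k = k0
      · subst hkk; simp
      · have h0 : (k0 == k) = false := by
          simp only [beq_eq_false_iff_ne, ne_eq]; exact fun h => hkk h.symm
        simp [h0, hkk]
    have hfcounts : ∀ k : String × String, (((l ++ [e]).filter flag).map key).count k
        = ((l.filter flag).map key).count k + (if k = k0 ∧ flag e then 1 else 0) := by
      intro k
      rw [List.filter_append, List.filter_cons]
      by_cases hb : flag e
      · simp only [hb, if_true, List.filter_nil, List.map_append, List.map_cons, List.map_nil,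
          List.count_append, List.count_singleton, and_true]
        rw [← hk0]
        by_cases hkk : k = k0
        · subst hkk; simp
        · have h0 : (k0 == k) = false := by
            simp only [beq_eq_false_iff_ne, ne_eq]; exact fun h => hkk h.symm
          simp [h0, hkk]
      · simp [hb]
    by_cases hm : k0 ∈ List.map key l
    · have hc : D.contains k0 = true := by simp [hcont, hm]
      have hVmem : (k0, pvVal (((l.filter flag).map key).count k0 : Int) (((l.map key).count k0 : Int))) ∈ D.items := by
        rw [ih]; exact List.mem_map_of_mem ((PySem.Set.mem_ofList _ _).mpr hm)
      have hgetD : D.getD k0 PySem.Dict.empty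
          = pvVal (((l.filter flag).map key).count k0 : Int) (((l.map key).count k0 : Int)) :=
        PySem.Dict.getD_of_mem_items D hVmem hknd PySem.Dict.empty
      have hS' : PySem.Set.ofList ((l ++ [e]).map key) = PySem.Set.ofList (l.map key) := by
        rw [List.map_append, List.map_cons, List.map_nil, PySem.Set.ofList_append_singleton]
        exact PySem.Set.add_of_mem ((PySem.Set.mem_ofList _ _).mpr hm)
      have hg : (if D.contains k0 then D else D.insert k0 (pvVal 0 0)) = D := by
        rw [hc]; simp
      have hfinal : (if flag e then
            D.modify k0 PySem.Dict.empty (fun inner => inner.modify "TP" 0 (· + 1))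
          else D).modify k0 PySem.Dict.empty (fun inner => inner.modify "Total" 0 (· + 1))
          = D.insert k0 (pvVal ((((l.filter flag).map key).count k0 : Int) + (if flag e then 1 else 0))
                               (((l.map key).count k0 : Int) + 1)) := by
        by_cases hb : flag e
        · rw [if_pos hb, if_pos hb]
          have h1 : D.modify k0 PySem.Dict.empty (fun inner => inner.modify "TP" 0 (· + 1))
              = D.insert k0 (pvVal ((((l.filter flag).map key).count k0 : Int) + 1) (((l.map key).count k0 : Int))) := by
            rw [PySem.Dict.modify, hgetD, pvModify_TP]
          rw [h1, PySem.Dict.modify, PySem.Dict.getD_insert_self, pvModify_Total, PySem.Dict.insert_insert_self]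
        · rw [if_neg hb, if_neg hb, add_zero]
          rw [PySem.Dict.modify, hgetD, pvModify_Total]
      rw [hg, hfinal, PySem.Dict.items_insert_of_contains _ _ hc, ih, List.map_map, hS']
      apply List.map_congr_left
      intro k hk
      simp only [Function.comp_apply]
      by_cases hkk : k = k0
      · subst hkk
        rw [hcounts, hfcounts]
        by_cases hb : flag e <;> simp [hb, pvVal]
      · rw [hcounts, hfcounts]
        simp [hkk]
    · have hc : D.contains k0 = false := by simp [hcont, hm]
      have hnotin_f : k0 ∉ (l.filter flag).map key := by
        intro h
        rcases List.mem_map.mp h with ⟨x, hx, hxk⟩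
        exact hm (List.mem_map.mpr ⟨x, List.mem_of_mem_filter hx, hxk⟩)
      have hg1 : (if D.contains k0 then D else D.insert k0 (pvVal 0 0)) = D.insert k0 (pvVal 0 0) := by
        rw [hc]; simp
      have hfinal : (if flag e then
            (D.insert k0 (pvVal 0 0)).modify k0 PySem.Dict.empty (fun inner => inner.modify "TP" 0 (· + 1))
          else D.insert k0 (pvVal 0 0)).modify k0 PySem.Dict.empty (fun inner => inner.modify "Total" 0 (· + 1))
          = D.insert k0 (pvVal (if flag e then 1 else 0) 1) := by
        by_cases hb : flag e
        · rw [if_pos hb, if_pos hb]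
          have h1 : (D.insert k0 (pvVal 0 0)).modify k0 PySem.Dict.empty (fun inner => inner.modify "TP" 0 (· + 1))
              = D.insert k0 (pvVal 1 0) := by
            rw [PySem.Dict.modify, PySem.Dict.getD_insert_self, pvModify_TP, PySem.Dict.insert_insert_self]
            norm_num
          rw [h1, PySem.Dict.modify, PySem.Dict.getD_insert_self, pvModify_Total, PySem.Dict.insert_insert_self]
          norm_num
        · rw [if_neg hb, if_neg hb]
          rw [PySem.Dict.modify, PySem.Dict.getD_insert_self, pvModify_Total, PySem.Dict.insert_insert_self]
          norm_num
      have hS' : PySem.Set.ofList ((l ++ [e]).map key) = PySem.Set.ofList (l.map key) ++ [k0] := by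
        rw [List.map_append, List.map_cons, List.map_nil, PySem.Set.ofList_append_singleton, ← hk0]
        exact PySem.Set.add_of_not_mem (fun h => hm ((PySem.Set.mem_ofList _ _).mp h))
      rw [hg1, hfinal, PySem.Dict.items_insert_of_not_contains _ _ hc, ih, hS', List.map_append]
      congr 1
      · apply List.map_congr_left
        intro k hk
        have hkk : k ≠ k0 := by
          intro h; subst h; exact hm ((PySem.Set.mem_ofList _ _).mp hk)
        rw [hcounts, hfcounts]
        simp [hkk]
      · rw [List.map_cons, List.map_nil, hcounts, hfcounts]
        rw [List.count_eq_zero.mpr hm, List.count_eq_zero.mpr hnotin_f]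
        by_cases hb : flag e <;> simp [hb]

-- ===== VERDICT (by name: the statement is the Claim_ definition above) =====
theorem extract_instances_by_group_spec : Claim_equal_extract_instances_by_group := by
  intro data lk gk _ _
  unfold Spec_extract_instances_by_group
  rw [pvA_eq, pvB_eq, pvFoldA_items, List.map_map]
  rfl
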